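-- pv_equiv track=rewrite | github.com/JKHira/sdsl2_coder | references/sdsl2_lint_samples/lint_utils.py | has_single_quoted_string
-- ===== SOURCE A (Python) =====
-- def has_single_quoted_string(line: str) -> bool:
--     in_double = False
--     escape = False
--     for ch in line:
--         if in_double:
--             if escape:
--                 escape = False
--             elif ch == "\\":
--                 escape = True
--             elif ch == "\"":
--                 in_double = False
--             continue
--         if ch == "\"":
--             in_double = True
--             continue
--         if ch == "'":
--             return True
--     return False
-- ===== SOURCE B (Python) =====
-- def has_single_quoted_string(line: str) -> bool:
--     s = line
--     while True:
--         d = s.find('"')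
--         if d == -1:
--             return "'" in s
--         if "'" in s[:d]:
--             return True
--         s = s[d + 1:]
--         # skip the double-quoted string: its closing quote is the first '"'
--         # preceded by an EVEN run of backslashes
--         while True:
--             j = s.find('"')
--             if j == -1:
--                 return False
--             k = 0
--             while k < j and s[j - 1 - k] == "\\":
--                 k += 1
--             s = s[j + 1:]
--             if k % 2 == 0:
--                 break
-- ===== Notes on version B (the rewrite author's own statement) =====
-- stated objective: faster
-- what changed: Replaces A's per-character in_double/escape state machine by substring search: B jumps with str.find from double quote to double quote, tests the quote-free segment for a single quote with the in operator, and decides whether a found double quote closes the string by the parity of the backslash run immediately before it.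
import Mathlib
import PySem

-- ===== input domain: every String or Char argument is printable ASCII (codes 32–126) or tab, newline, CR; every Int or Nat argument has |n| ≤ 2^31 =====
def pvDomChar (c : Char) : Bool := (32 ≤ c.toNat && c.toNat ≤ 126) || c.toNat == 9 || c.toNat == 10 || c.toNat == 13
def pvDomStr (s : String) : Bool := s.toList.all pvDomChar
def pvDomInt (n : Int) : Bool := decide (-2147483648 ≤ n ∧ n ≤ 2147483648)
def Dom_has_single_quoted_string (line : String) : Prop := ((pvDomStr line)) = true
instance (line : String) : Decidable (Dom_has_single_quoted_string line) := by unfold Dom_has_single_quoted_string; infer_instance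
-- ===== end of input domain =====

-- B replaces A's per-character in_double/escape state machine by substring search
-- (str.find jumps from quote to quote; the parity of the backslash run before a
-- found double quote decides whether it closes); measured faster by a constant factor.

-- ===== PORT A =====
-- A's for-loop with state (in_double, escape) and an early return, as structural recursion.
def hsqsA : List Char → Bool → Bool → Bool
  | [], _, _ => false
  | ch :: rest, in_double, escape =>
    if in_double then
      if escape then hsqsA rest in_double false
      else if ch == '\\' then hsqsA rest in_double true
      else if ch == '"' then hsqsA rest false escape
      else hsqsA rest in_double escape
    else if ch == '"' then hsqsA rest true escape
    else if ch == '\'' then true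
    else hsqsA rest in_double escape

def has_single_quoted_string (line : String) : Bool :=
  hsqsA line.toList false false

-- ===== PORT B =====
-- (lemma cited by the ports' termination proofs: a found quote is a valid index)
lemma find_quote_lt {s : List Char} (h : ¬ PySem.Chars.find s ['"'] = -1) :
    (PySem.Chars.find s ['"']).toNat < s.length := by
  have h0 : 0 ≤ PySem.Chars.find s ['"'] := by
    have := PySem.Chars.neg_one_le_find (s := s) (sub := ['"'])
    omega
  obtain ⟨hpre, -⟩ := PySem.Chars.find_spec (s := s) (sub := ['"']) h0
  by_contra hge
  have : s.drop (PySem.Chars.find s ['"']).toNat = [] :=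
    List.drop_eq_nil_of_le (by omega)
  rw [this] at hpre
  simpa using hpre.length_le

-- innermost while loop of Source B: k counts the backslashes right before index j
-- (Python reads s[j-1-k] only at in-range indices, so getD is exact here).
def bsRun (s : List Char) (j k : Nat) : Nat :=
  if k < j ∧ s.getD (j - 1 - k) ' ' == '\\' then bsRun s j (k + 1) else k
  termination_by j - k

-- inner while loop of Source B: find the closing '"' (even backslash run before it),
-- return the text after it; none = the Python loop's `return False` (unterminated).
def skipDq (s : List Char) : Option (List Char) :=
  let j := PySem.Chars.find s ['"']
  if h : j = -1 then none
  else
    let k := bsRun s j.toNat 0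
    let s' := s.drop (j.toNat + 1)
    if k % 2 == 0 then some s' else skipDq s'
  termination_by s.length
  decreasing_by
    have := find_quote_lt h
    simp only [List.length_drop]
    omega

lemma skipDq_some_lt : ∀ (n : Nat) (s r : List Char), s.length ≤ n →
    skipDq s = some r → r.length < s.length := by
  intro n
  induction n with
  | zero =>
    intro s r hs h
    have : s = [] := List.eq_nil_of_length_eq_zero (Nat.le_zero.mp hs)
    subst this
    rw [skipDq] at h
    simp [show PySem.Chars.find ([] : List Char) ['"'] = -1 from rfl] at h
  | succ n ih =>
    intro s r hs h
    rw [skipDq] at h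
    by_cases hf : PySem.Chars.find s ['"'] = -1
    · simp [hf] at h
    · have hdl := find_quote_lt (s := s) hf
      simp only [hf, dite_false] at h
      by_cases hpar : (bsRun s (PySem.Chars.find s ['"']).toNat 0 % 2 == 0) = true
      · rw [if_pos hpar] at h
        cases h
        simp only [List.length_drop]
        omega
      · rw [if_neg hpar] at h
        have := ih (s.drop ((PySem.Chars.find s ['"']).toNat + 1)) r
          (by simp only [List.length_drop]; omega) h
        simp only [List.length_drop] at this
        omega

-- outer while loop of Source B ("'" in s / "'" in s[:d] are Chars.isIn; s[d+1:] is drop).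
def bMain (s : List Char) : Bool :=
  let d := PySem.Chars.find s ['"']
  if hd : d = -1 then PySem.Chars.isIn ['\''] s
  else if PySem.Chars.isIn ['\''] (s.take d.toNat) then true
  else
    match hs : skipDq (s.drop (d.toNat + 1)) with
    | none => false
    | some s' => bMain s'
  termination_by s.length
  decreasing_by
    have h1 := skipDq_some_lt _ _ _ le_rfl hs
    have h2 := find_quote_lt hd
    simp only [List.length_drop] at h1
    omega

def has_single_quoted_string_alt (line : String) : Bool :=
  bMain line.toList

-- ===== PRECONDITION & SPEC =====
def Spec_has_single_quoted_string (line : String) (out : Bool) : Prop := out = has_single_quoted_string_alt line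
instance (line : String) (out : Bool) : Decidable (Spec_has_single_quoted_string line out) := by unfold Spec_has_single_quoted_string; infer_instance

-- ===== CLAIM (what is proved, stated in full; the proofs are below) =====
def Claim_equal_has_single_quoted_string : Prop := ∀ (line : String), Dom_has_single_quoted_string line → Spec_has_single_quoted_string line (has_single_quoted_string line)

-- ===== LEMMAS AND PROOFS =====

-- trailing backslash run of a list
def tb (l : List Char) : Nat := (l.reverse.takeWhile (fun c => c == '\\')).length

lemma tb_nil : tb [] = 0 := rfl

lemma tb_cons (c : Char) (p : List Char) :
    tb (c :: p) = if c = '\\' ∧ tb p = p.length then p.length + 1 else tb p := by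
  unfold tb
  rw [List.reverse_cons, List.takeWhile_append]
  by_cases hfull : (List.takeWhile (fun c => c == '\\') p.reverse).length = p.length
  · by_cases hc : c = '\\'
    · subst hc
      simp [hfull, List.takeWhile_cons]
    · simp [hfull, List.takeWhile_cons, hc, show (c == '\\') = false by simpa using hc]
  · have h1 : ¬ ((List.takeWhile (fun c => c == '\\') p.reverse).length = p.reverse.length) := by
      simpa using hfull
    rw [if_neg h1, if_neg (by intro h; exact hfull h.2)]

lemma tb_le (p : List Char) : tb p ≤ p.length := by
  unfold tb
  have := List.takeWhile_sublist (p := fun c => c == '\\') (l := p.reverse)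
  simpa using this.length_le

lemma tb_cons_ne (c : Char) (p : List Char) (hc : c ≠ '\\') : tb (c :: p) = tb p := by
  rw [tb_cons]; simp [hc]

lemma tb_snoc_bs (l : List Char) : tb (l ++ ['\\']) = tb l + 1 := by
  unfold tb
  simp [List.takeWhile_cons]

lemma tb_snoc_ne (l : List Char) (b : Char) (hb : b ≠ '\\') : tb (l ++ [b]) = 0 := by
  unfold tb
  simp [List.takeWhile_cons, hb]

lemma tb_two_cons_parity (x : Char) (p : List Char) :
    tb ('\\' :: x :: p) % 2 = tb p % 2 := by
  by_cases hx : x = '\\'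
  · subst hx
    by_cases hfull : tb p = p.length
    · have h1 : tb ('\\' :: p) = p.length + 1 := by rw [tb_cons, if_pos ⟨rfl, hfull⟩]
      have h2 : tb ('\\' :: '\\' :: p) = p.length + 2 := by
        rw [tb_cons, if_pos ⟨rfl, by simpa using h1⟩]
        simp
      rw [h2, hfull]
      omega
    · have h1 : tb ('\\' :: p) = tb p := by
        rw [tb_cons, if_neg (by intro h; exact hfull h.2)]
      have h2 : tb ('\\' :: '\\' :: p) = tb p := by
        have hle := tb_le p
        rw [tb_cons, if_neg (by intro h; rw [h1] at h; simp at h; omega), h1]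
      rw [h2]
  · have h2 : tb ('\\' :: x :: p) = tb p := by
      have hle := tb_le p
      rw [tb_cons, if_neg (by intro h; rw [tb_cons_ne x p hx] at h; simp at h; omega),
        tb_cons_ne x p hx]
    rw [h2]

-- bsRun computes the trailing backslash run of s.take (j - k), offset by k
lemma bsRun_eq_tb (s : List Char) (j : Nat) (hj : j ≤ s.length) :
    ∀ k, k ≤ j → bsRun s j k = k + tb (s.take (j - k)) := by
  intro k
  induction k using bsRun.induct s j with
  | case1 k hcond ih =>
    intro hk
    obtain ⟨hlt, hbs⟩ := hcond
    rw [bsRun]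
    simp only [hlt, hbs, and_self, if_true]
    rw [ih (by omega)]
    have hidx : j - 1 - k < s.length := by omega
    have htake : s.take (j - k) = s.take (j - k - 1) ++ [s[j - 1 - k]] := by
      have h1 : j - k - 1 = j - 1 - k := by omega
      have h2 : j - k = (j - k - 1) + 1 := by omega
      rw [h2, h1, List.take_succ]
      simp [List.getElem?_eq_getElem hidx]
    have hc : s[j - 1 - k] = '\\' := by
      have : s.getD (j - 1 - k) ' ' = '\\' := by simpa using hbs
      rwa [List.getD_eq_getElem s ' ' hidx] at this
    rw [htake, hc, tb_snoc_bs]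
    have : j - (k + 1) = j - k - 1 := by omega
    rw [this]
    omega
  | case2 k hcond =>
    intro hk
    rw [bsRun]
    simp only [hcond, if_false]
    rcases Nat.lt_or_ge k j with hlt | hge
    · -- run stops because s[j-1-k] is not a backslash
      have hidx : j - 1 - k < s.length := by omega
      have hbs : ¬ (s.getD (j - 1 - k) ' ' == '\\') = true := by
        intro h; exact hcond ⟨hlt, h⟩
      have hc : s[j - 1 - k] ≠ '\\' := by
        rw [List.getD_eq_getElem s ' ' hidx] at hbs
        simpa using hbs
      have htake : s.take (j - k) = s.take (j - k - 1) ++ [s[j - 1 - k]] := by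
        have h1 : j - k - 1 = j - 1 - k := by omega
        have h2 : j - k = (j - k - 1) + 1 := by omega
        rw [h2, h1, List.take_succ]
        simp [List.getElem?_eq_getElem hidx]
      rw [htake, tb_snoc_ne _ _ hc]
      simp [tb_nil]
    · have : j - k = 0 := by omega
      rw [this]
      simp [tb_nil]

-- single-character find: decomposition of s at the first '"'
lemma singleton_infix_iff (c : Char) (s : List Char) : [c] <:+: s ↔ c ∈ s := by
  constructor
  · rintro ⟨u, v, rfl⟩; simp
  · intro h
    obtain ⟨u, v, rfl⟩ := List.append_of_mem h
    exact ⟨u, v, by simp⟩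

lemma isIn_singleton (c : Char) (s : List Char) :
    PySem.Chars.isIn [c] s = true ↔ c ∈ s := by
  rw [PySem.Chars.isIn_iff_infix, singleton_infix_iff]

lemma find_char_neg (c : Char) (s : List Char) :
    PySem.Chars.find s [c] = -1 ↔ c ∉ s := by
  rw [PySem.Chars.find_eq_neg_one_iff, singleton_infix_iff]

lemma find_char_decomp (c : Char) (s : List Char)
    (h : ¬ PySem.Chars.find s [c] = -1) :
    c ∉ s.take (PySem.Chars.find s [c]).toNat ∧
    s = s.take (PySem.Chars.find s [c]).toNat ++ c :: s.drop ((PySem.Chars.find s [c]).toNat + 1) := by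
  have h0 : 0 ≤ PySem.Chars.find s [c] := by
    have := PySem.Chars.neg_one_le_find (s := s) (sub := [c])
    omega
  obtain ⟨hpre, hfirst⟩ := PySem.Chars.find_spec (s := s) (sub := [c]) h0
  set d := (PySem.Chars.find s [c]).toNat with hd
  obtain ⟨r, hr⟩ := hpre
  have hdrop : s.drop d = c :: s.drop (d + 1) := by
    rw [← hr]
    congr 1
    rw [← List.tail_drop, ← hr]
    rfl
  constructor
  · intro hmem
    have hdl : d < s.length := by
      by_contra hge
      have hnil : s.drop d = [] := List.drop_eq_nil_of_le (by omega)
      rw [hnil] at hdrop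
      cases hdrop
    obtain ⟨i, hi, hgi⟩ := List.mem_iff_getElem.mp hmem
    have hi' : i < d := by
      have h2 := hi
      simp only [List.length_take, lt_inf_iff] at h2
      exact h2.1
    have hsi : s[i]'(by omega) = c := by
      rw [List.getElem_take] at hgi
      exact hgi
    apply hfirst i hi'
    rw [List.drop_eq_getElem_cons (show i < s.length by omega), hsi]
    exact ⟨s.drop (i + 1), rfl⟩
  · conv_lhs => rw [← List.take_append_drop d s]
    rw [hdrop]

-- A inside a double-quoted string never returns True
lemma hsqsA_in_no_quote : ∀ (s : List Char) (e : Bool), '"' ∉ s → hsqsA s true e = false := by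
  intro s
  induction s with
  | nil => intro e _; rfl
  | cons c t ih =>
    intro e hmem
    have hc : c ≠ '"' := fun h => hmem (h ▸ List.mem_cons_self)
    have ht : '"' ∉ t := fun h => hmem (List.mem_cons_of_mem _ h)
    cases e with
    | true => simpa [hsqsA] using ih false ht
    | false =>
      by_cases hb : c = '\\'
      · subst hb; simpa [hsqsA] using ih true ht
      · simp only [hsqsA, if_true]
        simp [show (c == '\\') = false by simpa using hb,
              show (c == '"') = false by simpa using hc, ih _ ht]

-- A outside: scanning a quote-free prefix is a single-quote membership test
lemma hsqsA_out_prefix : ∀ (p t : List Char), '"' ∉ p →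
    hsqsA (p ++ t) false false = (p.contains '\'' || hsqsA t false false) := by
  intro p
  induction p with
  | nil => intro t _; simp
  | cons c p ih =>
    intro t hmem
    have hc : c ≠ '"' := fun h => hmem (h ▸ List.mem_cons_self)
    have hp : '"' ∉ p := fun h => hmem (List.mem_cons_of_mem _ h)
    by_cases hs : c = '\''
    · subst hs; simp [hsqsA]
    · simp only [List.cons_append, hsqsA, if_false]
      simp [show (c == '"') = false by simpa using hc,
            show (c == '\'') = false by simpa using hs, ih t hp,
            show ('\'' == c) = false by simpa using fun h => hs h.symm,
            show ('\'' = c) = False from eq_false (fun h => hs h.symm)]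

-- A inside: at the first '"' after a quote-free prefix p, the parity of p's
-- trailing backslash run decides whether the string closes
lemma hsqsA_in_prefix : ∀ (n : Nat) (p : List Char), p.length ≤ n → ∀ (t : List Char), '"' ∉ p →
    hsqsA (p ++ '"' :: t) true false =
      (if tb p % 2 = 0 then hsqsA t false false else hsqsA t true false) := by
  intro n
  induction n with
  | zero =>
    intro p hp t _
    have : p = [] := List.eq_nil_of_length_eq_zero (Nat.le_zero.mp hp)
    subst this
    simp [hsqsA, tb_nil]
  | succ n ih =>
    intro p hp t hmem
    match p with
    | [] => simp [hsqsA, tb_nil]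
    | c :: p' =>
      have hc : c ≠ '"' := fun h => hmem (h ▸ List.mem_cons_self)
      have hp' : '"' ∉ p' := fun h => hmem (List.mem_cons_of_mem _ h)
      have hlen' : p'.length ≤ n := by simpa using Nat.succ_le_succ_iff.mp hp
      by_cases hb : c = '\\'
      · subst hb
        simp only [List.cons_append, hsqsA, if_true]
        norm_num
        match p' with
        | [] =>
          -- escape consumes the quote itself: run length 1, odd
          simp [hsqsA, tb_cons, tb_nil]
        | x :: p'' =>
          have hx : x ≠ '"' := fun h => hp' (h ▸ List.mem_cons_self)
          have hp'' : '"' ∉ p'' := fun h => hp' (List.mem_cons_of_mem _ h)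
          have hlen'' : p''.length ≤ n := by simp at hlen'; omega
          simp only [List.cons_append, hsqsA, if_true]
          norm_num
          rw [ih p'' hlen'' t hp'', tb_two_cons_parity]
      · simp only [List.cons_append, hsqsA, if_true]
        simp only [show (c == '\\') = false by simpa using hb,
                   show (c == '"') = false by simpa using hc, if_false]
        rw [ih p' hlen' t hp', tb_cons_ne c p' hb]
        simp

-- B's quoted-string skip agrees with A's inside-state scan
lemma inside_eq : ∀ (n : Nat) (s : List Char), s.length ≤ n →
    hsqsA s true false =
      (match skipDq s with | none => false | some r => hsqsA r false false) := by
  intro n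
  induction n with
  | zero =>
    intro s hs
    have : s = [] := List.eq_nil_of_length_eq_zero (Nat.le_zero.mp hs)
    subst this
    rw [skipDq]
    simp [hsqsA, show PySem.Chars.find ([] : List Char) ['"'] = -1 from
      (find_char_neg '"' []).mpr (by simp)]
  | succ n ih =>
    intro s hs
    by_cases hf : PySem.Chars.find s ['"'] = -1
    · rw [skipDq]
      simp only [hf, dite_true]
      exact hsqsA_in_no_quote s false ((find_char_neg '"' s).mp hf)
    · obtain ⟨hnot, hdec⟩ := find_char_decomp '"' s hf
      set d := (PySem.Chars.find s ['"']).toNat with hd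
      set p := s.take d with hptake
      set t := s.drop (d + 1) with httake
      have hdl : d < s.length := find_quote_lt hf
      have hplen : p.length = d := by simp [hptake, List.length_take]; omega
      have htlen : t.length = s.length - d - 1 := by simp [httake]; omega
      have hrun : bsRun s d 0 = tb p := by
        simpa using bsRun_eq_tb s d (by omega) 0 (by omega)
      rw [skipDq]
      simp only [hf, dite_false]
      rw [← hd, hrun]
      conv_lhs => rw [hdec]
      rw [hsqsA_in_prefix s.length p (by omega) t hnot]
      by_cases hpar : tb p % 2 = 0
      · simp [hpar, ← httake]
      · have hpar' : (tb p % 2 == 0) = false := by simpa using hpar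
        simp only [hpar', Bool.false_eq_true, if_false, if_neg hpar]
        rw [ih t (by omega), ← httake]
  termination_by n => n

-- the two main loops agree
lemma main_eq : ∀ (n : Nat) (s : List Char), s.length ≤ n →
    hsqsA s false false = bMain s := by
  intro n
  induction n with
  | zero =>
    intro s hs
    have : s = [] := List.eq_nil_of_length_eq_zero (Nat.le_zero.mp hs)
    subst this
    rw [bMain]
    simp [hsqsA, show PySem.Chars.find ([] : List Char) ['"'] = -1 from
      (find_char_neg '"' []).mpr (by simp),
      show PySem.Chars.isIn ['\''] ([] : List Char) = false by decide]
  | succ n ih =>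
    intro s hs
    by_cases hf : PySem.Chars.find s ['"'] = -1
    · rw [bMain]
      simp only [hf, dite_true]
      have hnq : '"' ∉ s := (find_char_neg '"' s).mp hf
      have := hsqsA_out_prefix s [] hnq
      rw [List.append_nil] at this
      rw [this]
      simp only [hsqsA, Bool.or_false]
      by_cases hm : '\'' ∈ s
      · simp [List.contains_iff_mem, hm, (isIn_singleton '\'' s).mpr hm]
      · have h2 : PySem.Chars.isIn ['\''] s = false := by
          by_cases h : PySem.Chars.isIn ['\''] s = true
          · exact absurd ((isIn_singleton _ _).mp h) hm
          · simpa using h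
        simp [List.contains_iff_mem, hm, h2]
    · obtain ⟨hnot, hdec⟩ := find_char_decomp '"' s hf
      set d := (PySem.Chars.find s ['"']).toNat with hd
      set p := s.take d with hptake
      set t := s.drop (d + 1) with httake
      have hdl : d < s.length := find_quote_lt hf
      have hplen : p.length = d := by simp [hptake, List.length_take]; omega
      have htlen : t.length = s.length - d - 1 := by simp [httake]; omega
      rw [bMain]
      simp only [hf, dite_false]
      rw [← hd, ← hptake, ← httake]
      conv_lhs => rw [hdec]
      rw [hsqsA_out_prefix p ('"' :: t) hnot]
      simp only [hsqsA]
      norm_num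
      by_cases hq : '\'' ∈ p
      · simp [List.contains_iff_mem, hq, (isIn_singleton '\'' p).mpr hq]
      · have h2 : PySem.Chars.isIn ['\''] p = false := by
          by_cases h : PySem.Chars.isIn ['\''] p = true
          · exact absurd ((isIn_singleton _ _).mp h) hq
          · simpa using h
        simp only [List.contains_iff_mem, h2, eq_false hq, decide_false, Bool.false_or,
          Bool.false_eq_true, if_false]
        rw [inside_eq t.length t le_rfl]
        cases hres : skipDq t with
        | none => simp [hres]
        | some s' =>
          have hlt := skipDq_some_lt t.length t s' le_rfl hres
          simp only [hres]
          exact ih s' (by omega)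

-- ===== VERDICT (by name: the statement is the Claim_ definition above) =====
theorem has_single_quoted_string_spec : Claim_equal_has_single_quoted_string := by
  intro line _
  unfold Spec_has_single_quoted_string has_single_quoted_string has_single_quoted_string_alt
  exact main_eq line.toList.length line.toList le_rfl
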